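-- pv_equiv track=rewrite | github.com/croningp/oligoss | polymersoup/postprocessing/postprocess_helpers.py | get_core_fragments
-- ===== SOURCE A (Python) =====
-- def get_core_fragments(
--     target_fragments,
--     core_series
-- ):
--     """
--     Takes a list of fragment ids, target core fragment series (one letter
--     codes) and returns list of target fragments that fall within one or more
--     of the specified core series
--
--     Args:
--         target_fragments (list): list of fragment id strings
--         core_series (list or str): list of core fragment series one letter
--             codes OR single one letter code for single core series
--
--     Returns:
--         list: list of fragments in input target fragments that belong to one
--             or more core series
--     """
--     # initialise list to store core fragments
--     core_fragments = []
--
--     # make core_series a list if not already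
--     if type(core_series) != list:
--         core_series = [core_series]
--
--     # iterate through core series, adding fragments from target that belong
--     # to one or more core series to core_fragments
--     for frag_series in core_series:
--         core_fragments.extend([
--             frag for frag in target_fragments
--             if frag[0] == frag_series
--         ])
--
--     return list(set(core_fragments))
-- ===== SOURCE B (Python) =====
-- def get_core_fragments(target_fragments, core_series):
--     # make core_series a list if not already
--     if type(core_series) != list:
--         core_series = [core_series]
--
--     # single pass: group fragments by their first character
--     index = {}
--     for frag in target_fragments:
--         index.setdefault(frag[0], []).append(frag)
--
--     # collect the groups for the requested series codes
--     collected = []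
--     for code in core_series:
--         collected.extend(index.get(code, []))
--
--     return list(set(collected))
-- ===== Notes on version B (the rewrite author's own statement) =====
-- stated objective: faster
-- what changed: Instead of rescanning all target fragments once per core-series code, B makes one grouping pass that indexes fragments by their first character in a dict and then just concatenates the looked-up groups per code.
-- outside the precondition, e.g. on get_core_fragments([''], []): A returns [], B raises IndexError
import Mathlib
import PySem

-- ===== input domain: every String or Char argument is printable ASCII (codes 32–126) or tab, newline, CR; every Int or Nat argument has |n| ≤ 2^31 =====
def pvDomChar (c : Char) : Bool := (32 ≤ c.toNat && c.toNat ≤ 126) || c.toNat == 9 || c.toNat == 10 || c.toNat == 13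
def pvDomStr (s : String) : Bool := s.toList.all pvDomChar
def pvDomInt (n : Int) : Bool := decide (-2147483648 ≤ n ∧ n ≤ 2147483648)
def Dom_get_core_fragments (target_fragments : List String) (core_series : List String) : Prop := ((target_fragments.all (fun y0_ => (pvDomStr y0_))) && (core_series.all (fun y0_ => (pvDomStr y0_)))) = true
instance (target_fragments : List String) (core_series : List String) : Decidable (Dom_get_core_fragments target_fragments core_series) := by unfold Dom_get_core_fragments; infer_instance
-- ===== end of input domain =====

-- B replaces A's per-code rescan of target_fragments by a single grouping pass (dict keyed by
-- the fragment's first character) followed by lookups — an asymptotically faster decomposition.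

-- frag[0] as a one-character string, given as its character list ('[]' is unreachable under
-- Pre_, which excludes empty fragments, where Python raises IndexError)
def pvFirstKey (frag : String) : List Char :=
  ((PySem.Str.pyGet? frag 0).map (fun c => [c])).getD []

-- ===== PORT A =====
def get_core_fragments (target_fragments : List String) (core_series : List String) : List String :=
  -- core_fragments = []; for frag_series in core_series: core_fragments.extend([... if frag[0] == frag_series])
  let core_fragments := core_series.foldl
    (fun acc frag_series =>
      acc ++ target_fragments.filter (fun frag => pvFirstKey frag == frag_series.toList)) []
  -- return list(set(core_fragments))
  PySem.Set.ofList core_fragments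

-- ===== PORT B =====
def get_core_fragments_alt (target_fragments : List String) (core_series : List String) : List String :=
  -- index = {}; for frag in target_fragments: index.setdefault(frag[0], []).append(frag)
  let index := target_fragments.foldl
    (fun d frag => d.modify (pvFirstKey frag) [] (fun g => g ++ [frag]))
    (PySem.Dict.empty : PySem.Dict (List Char) (List String))
  -- collected = []; for code in core_series: collected.extend(index.get(code, []))
  let collected := core_series.foldl (fun acc code => acc ++ index.getD code.toList []) []
  -- return list(set(collected))
  PySem.Set.ofList collected

-- ===== PRECONDITION & SPEC =====
-- Pre_ excludes empty-string fragments: on them Python A raises IndexError whenever core_series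
-- is non-empty, and B's grouping pass raises IndexError even when core_series is empty (where A
-- returns []) — see claim.json "cites".
def Pre_get_core_fragments (target_fragments : List String) (core_series : List String) : Prop :=
  "" ∉ target_fragments
instance (target_fragments : List String) (core_series : List String) : Decidable (Pre_get_core_fragments target_fragments core_series) := by unfold Pre_get_core_fragments; infer_instance

def pvWitness_get_core_fragments : List String × List String := (["ab", "bc", "a1"], ["a", "z"])

def Spec_get_core_fragments (target_fragments : List String) (core_series : List String) (out : List String) : Prop := out = get_core_fragments_alt target_fragments core_series
instance (target_fragments : List String) (core_series : List String) (out : List String) : Decidable (Spec_get_core_fragments target_fragments core_series out) := by unfold Spec_get_core_fragments; infer_instance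

-- ===== CLAIM (what is proved, stated in full; the proofs are below) =====
def Claim_equal_get_core_fragments : Prop := ∀ (target_fragments : List String) (core_series : List String), Dom_get_core_fragments target_fragments core_series → Pre_get_core_fragments target_fragments core_series → Spec_get_core_fragments target_fragments core_series (get_core_fragments target_fragments core_series)

-- ===== LEMMAS AND PROOFS =====

-- the grouping dict looked up at k is exactly A's filter of target_fragments at k
theorem pvIndex_getD (tf : List String) (k : List Char) :
    (tf.foldl (fun d frag => d.modify (pvFirstKey frag) [] (fun g => g ++ [frag]))
        (PySem.Dict.empty : PySem.Dict (List Char) (List String))).getD k []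
      = tf.filter (fun frag => pvFirstKey frag == k) := by
  have h :
      tf.foldl (fun d frag => d.modify (pvFirstKey frag) [] (fun g => g ++ [frag]))
          (PySem.Dict.empty : PySem.Dict (List Char) (List String))
        = (tf.map (fun frag => (pvFirstKey frag, frag))).foldl
            (fun d p => d.modify p.1 [] (fun g => g ++ [p.2])) PySem.Dict.empty := by
    rw [List.foldl_map]
  rw [h, PySem.Dict.getD_foldl_modify_append, PySem.Dict.getD_empty]
  simp [List.filter_map, Function.comp_def]

-- ===== VERDICT (by name: the statement is the Claim_ definition above) =====
theorem get_core_fragments_spec : Claim_equal_get_core_fragments := by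
  intro tf cs _ _
  have h2 : List.foldl (fun acc code =>
        acc ++ (tf.foldl (fun d frag => d.modify (pvFirstKey frag) [] (fun g => g ++ [frag]))
          (PySem.Dict.empty : PySem.Dict (List Char) (List String))).getD code.toList []) [] cs
      = List.foldl (fun acc frag_series =>
        acc ++ tf.filter (fun frag => pvFirstKey frag == frag_series.toList)) [] cs := by
    apply PySem.List.foldl_congr_mem
    intro acc code _
    rw [pvIndex_getD]
  show PySem.Set.ofList
      (List.foldl (fun acc frag_series =>
        acc ++ List.filter (fun frag => pvFirstKey frag == frag_series.toList) tf) [] cs)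
    = PySem.Set.ofList
      (List.foldl (fun acc code =>
        acc ++ (List.foldl (fun d frag => d.modify (pvFirstKey frag) [] (fun g => g ++ [frag]))
          (PySem.Dict.empty : PySem.Dict (List Char) (List String)) tf).getD code.toList []) [] cs)
  rw [h2]
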